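-- pv_equiv track=rewrite | github.com/Education-IT/lm-evaluation-harness | lm_eval/api/webcontext.py | checkIfSnippetHasTestFormat
-- ===== SOURCE A (Python) =====
-- def checkIfSnippetHasTestFormat(webGrams):
--     ab = "ab"
--     bc = "bc"
--     cd = "cd"
--
--     id_ab = 0
--     id_bc = 0
--     id_cd = 0
--
--     for onegram in webGrams:
--         if onegram == ab[id_ab]:
--             id_ab += 1
--             if id_ab == 2:
--                 return True
--
--         elif onegram == bc[id_bc]:
--             id_bc += 1
--             if id_bc == 2:
--                 return True
--
--         elif onegram == cd[id_cd]:
--             id_cd += 1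
--             if id_cd == 2:
--                 return True
--
--     return False
-- ===== SOURCE B (Python) =====
-- def checkIfSnippetHasTestFormat(webGrams):
--     grams = list(webGrams)
--     for first, second in (("a", "b"), ("b", "c"), ("c", "d")):
--         if first in grams and second in grams[grams.index(first) + 1:]:
--             return True
--     return False
-- ===== Notes on version B (the rewrite author's own statement) =====
-- stated objective: simpler
-- what changed: Replaced the fused three-counter state machine with a direct check, for each of the three pairs (a,b),(b,c),(c,d), that the first element occurs and the second element occurs after its first occurrence (membership + index + slice).
import Mathlib
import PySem

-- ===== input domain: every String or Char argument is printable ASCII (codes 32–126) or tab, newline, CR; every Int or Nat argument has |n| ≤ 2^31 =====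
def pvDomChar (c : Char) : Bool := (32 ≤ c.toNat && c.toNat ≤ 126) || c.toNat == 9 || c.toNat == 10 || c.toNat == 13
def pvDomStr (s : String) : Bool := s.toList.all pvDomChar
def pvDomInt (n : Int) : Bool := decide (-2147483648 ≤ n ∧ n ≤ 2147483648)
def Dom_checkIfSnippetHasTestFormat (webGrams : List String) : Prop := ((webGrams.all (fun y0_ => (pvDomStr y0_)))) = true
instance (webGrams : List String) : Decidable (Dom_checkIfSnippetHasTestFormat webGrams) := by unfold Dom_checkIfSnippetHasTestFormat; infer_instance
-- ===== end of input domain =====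

-- B replaces A's fused three-counter state machine by a per-pair first-occurrence/slice check (objective: simpler).

-- ===== PORT A =====
-- The loop of A with its three counters and early return, as structural recursion over the list.
-- In Python, ab[id_ab] is the 1-character string "a" or "b"; counters only ever reach
-- a comparison at value 0 or 1 because the function returns at 2.
def chkLoopA : List String → Nat → Nat → Nat → Bool
  | [], _, _, _ => false
  | g :: rest, idAb, idBc, idCd =>
    if g = (if idAb = 0 then "a" else "b") then
      (if idAb + 1 = 2 then true else chkLoopA rest (idAb + 1) idBc idCd)
    else if g = (if idBc = 0 then "b" else "c") then
      (if idBc + 1 = 2 then true else chkLoopA rest idAb (idBc + 1) idCd)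
    else if g = (if idCd = 0 then "c" else "d") then
      (if idCd + 1 = 2 then true else chkLoopA rest idAb idBc (idCd + 1))
    else chkLoopA rest idAb idBc idCd

def checkIfSnippetHasTestFormat (webGrams : List String) : Bool :=
  chkLoopA webGrams 0 0 0

-- ===== PORT B =====
-- Source B: for each pair, 'first in grams and second in grams[grams.index(first)+1:]'.
def pairCheckB (grams : List String) (first second : String) : Bool :=
  decide (first ∈ grams) &&
    (match PySem.List.index? grams first with
     | some i => decide (second ∈ PySem.List.slice grams (some ((i : Int) + 1)) none)
     | none => false)

def checkIfSnippetHasTestFormat_alt (webGrams : List String) : Bool :=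
  let grams := webGrams
  [("a", "b"), ("b", "c"), ("c", "d")].any fun p => pairCheckB grams p.1 p.2

-- ===== PRECONDITION & SPEC =====
def Spec_checkIfSnippetHasTestFormat (webGrams : List String) (out : Bool) : Prop := out = checkIfSnippetHasTestFormat_alt webGrams
instance (webGrams : List String) (out : Bool) : Decidable (Spec_checkIfSnippetHasTestFormat webGrams out) := by unfold Spec_checkIfSnippetHasTestFormat; infer_instance

-- ===== CLAIM (what is proved, stated in full; the proofs are below) =====
def Claim_equal_checkIfSnippetHasTestFormat : Prop := ∀ (webGrams : List String), Dom_checkIfSnippetHasTestFormat webGrams → Spec_checkIfSnippetHasTestFormat webGrams (checkIfSnippetHasTestFormat webGrams)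

-- ===== LEMMAS AND PROOFS =====

-- 'second occurs strictly after the first occurrence of first'.
def hasPair (f s : String) : List String → Bool
  | [] => false
  | x :: r => if x = f then decide (s ∈ r) else hasPair f s r

-- invariant value of the machine: each counter at 1 shortcuts to 'second element still to come'.
def machineSpec (l : List String) (a b c : Bool) : Bool :=
  ((a && decide ("b" ∈ l)) || hasPair "a" "b" l) ||
  ((b && decide ("c" ∈ l)) || hasPair "b" "c" l) ||
  ((c && decide ("d" ∈ l)) || hasPair "c" "d" l)

theorem mem_of_hasPair {f s : String} {l : List String} (h : hasPair f s l = true) : s ∈ l := by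
  induction l with
  | nil => simp [hasPair] at h
  | cons x r ih =>
    by_cases hx : x = f
    · simp [hasPair, hx] at h
      exact List.mem_cons_of_mem _ h
    · simp [hasPair, hx] at h
      exact List.mem_cons_of_mem _ (ih h)

theorem collapse (f s : String) (l : List String) :
    (decide (s ∈ l) || hasPair f s l) = decide (s ∈ l) := by
  cases hp : hasPair f s l with
  | false => simp
  | true => simp [mem_of_hasPair hp]

theorem machineSpec_cons (x : String) (r : List String) (a b c : Bool) :
    machineSpec (x :: r) a b c =
      (if x = "a" then machineSpec r true b c
       else if x = "b" then (if a then true else machineSpec r a true c)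
       else if x = "c" then (if b then true else machineSpec r a b true)
       else if x = "d" then (if c then true else machineSpec r a b c)
       else machineSpec r a b c) := by
  by_cases h1 : x = "a"
  · subst h1; cases a <;> simp [machineSpec, hasPair, collapse, List.mem_cons]
  · have h1' : ¬ ("a" = x) := fun h => h1 h.symm
    by_cases h2 : x = "b"
    · subst h2; cases a <;> cases b <;> simp [machineSpec, hasPair, collapse, List.mem_cons]
    · have h2' : ¬ ("b" = x) := fun h => h2 h.symm
      by_cases h3 : x = "c"
      · subst h3; cases b <;> cases c <;> simp [machineSpec, hasPair, collapse, List.mem_cons]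
      · have h3' : ¬ ("c" = x) := fun h => h3 h.symm
        by_cases h4 : x = "d"
        · subst h4; cases c <;> simp [machineSpec, hasPair, List.mem_cons]
        · have h4' : ¬ ("d" = x) := fun h => h4 h.symm
          simp [machineSpec, hasPair, List.mem_cons, h1, h2, h3, h4, h2', h3', h4']

set_option maxHeartbeats 1000000 in
theorem chkLoopA_eq_machineSpec (l : List String) :
    ∀ (a b c : Nat), a ≤ 1 → b ≤ 1 → c ≤ 1 →
      chkLoopA l a b c = machineSpec l (a == 1) (b == 1) (c == 1) := by
  induction l with
  | nil => intro a b c _ _ _; simp [chkLoopA, machineSpec, hasPair]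
  | cons x r ih =>
    intro a b c ha hb hc
    have i000 := ih 0 0 0 (by omega) (by omega) (by omega)
    have i100 := ih 1 0 0 (by omega) (by omega) (by omega)
    have i010 := ih 0 1 0 (by omega) (by omega) (by omega)
    have i001 := ih 0 0 1 (by omega) (by omega) (by omega)
    have i110 := ih 1 1 0 (by omega) (by omega) (by omega)
    have i101 := ih 1 0 1 (by omega) (by omega) (by omega)
    have i011 := ih 0 1 1 (by omega) (by omega) (by omega)
    have i111 := ih 1 1 1 (by omega) (by omega) (by omega)
    interval_cases a <;> interval_cases b <;> interval_cases c <;>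
      rw [machineSpec_cons] <;>
      simp only [chkLoopA] <;>
      norm_num <;>
      split_ifs <;>
      simp_all

theorem pairCheckB_eq_hasPair (f s : String) (l : List String) :
    pairCheckB l f s = hasPair f s l := by
  induction l with
  | nil =>
    unfold pairCheckB
    simp [hasPair]
  | cons x r ih =>
    by_cases hx : x = f
    · subst hx
      unfold pairCheckB
      rw [PySem.List.index?_cons_self]
      show (decide (x ∈ x :: r) &&
        decide (s ∈ PySem.List.slice (x :: r) (some (((0 : Nat) : Int) + 1)))) = hasPair x s (x :: r)
      rw [show ((0 : Nat) : Int) + 1 = ((1 : Nat) : Int) by norm_num,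
        PySem.List.slice_from_natCast]
      simp [hasPair]
    · rw [hasPair, if_neg hx, ← ih]
      unfold pairCheckB
      rw [PySem.List.index?_cons_of_ne r hx]
      cases hi : PySem.List.index? r f with
      | none =>
        have hf : f ∉ r := (PySem.List.index?_eq_none_iff r f).mp hi
        simp [hf, Ne.symm hx]
      | some i =>
        have hf : f ∈ r := (PySem.List.index?_isSome_iff r f).mp (by rw [hi]; rfl)
        simp only [Option.map_some]
        rw [show ((i + 1 : Nat) : Int) + 1 = ((i + 2 : Nat) : Int) by push_cast; ring,
          show ((i : Nat) : Int) + 1 = ((i + 1 : Nat) : Int) by push_cast; ring,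
          PySem.List.slice_from_natCast, PySem.List.slice_from_natCast]
        simp [hf, Ne.symm hx, List.mem_cons, List.drop]

theorem alt_eq_machineSpec (l : List String) :
    checkIfSnippetHasTestFormat_alt l = machineSpec l false false false := by
  simp [checkIfSnippetHasTestFormat_alt, machineSpec, pairCheckB_eq_hasPair,
    List.any_cons, Bool.or_assoc]

-- ===== VERDICT (by name: the statement is the Claim_ definition above) =====
theorem checkIfSnippetHasTestFormat_spec : Claim_equal_checkIfSnippetHasTestFormat := by
  intro l _
  unfold Spec_checkIfSnippetHasTestFormat checkIfSnippetHasTestFormat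
  rw [chkLoopA_eq_machineSpec l 0 0 0 (by omega) (by omega) (by omega), alt_eq_machineSpec]
  rfl
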